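-- pv_equiv track=rewrite | github.com/aganiezgoda/json_comparison | backend/main.py | anonymize_data
-- ===== SOURCE A (Python) =====
-- def anonymize_name(name: str) -> str:
--     """
--     Anonymize a name by keeping first 2 and last 2 characters, replacing rest with asterisks.
--     Example: 'Jan Kowalski' -> 'Ja********ki'
--     """
--     if not name or len(name) <= 4:
--         return name
--
--     first_two = name[:2]
--     last_two = name[-2:]
--     middle_length = len(name) - 4
--
--     return f"{first_two}{'*' * middle_length}{last_two}"
--
-- def anonymize_data(data: dict, name_fields: list[str] = None) -> dict:
--     """Anonymize specified name fields in the data dictionary."""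
--     if name_fields is None:
--         name_fields = ["seller_name", "buyer_name"]
--
--     anonymized = data.copy()
--     for field in name_fields:
--         if field in anonymized and isinstance(anonymized[field], str):
--             anonymized[field] = anonymize_name(anonymized[field])
--
--     return anonymized
-- ===== SOURCE B (Python) =====
-- def anonymize_name(name: str) -> str:
--     """
--     Anonymize a name by keeping first 2 and last 2 characters, replacing rest with asterisks.
--     Example: 'Jan Kowalski' -> 'Ja********ki'
--     """
--     if not name or len(name) <= 4:
--         return name
--
--     first_two = name[:2]
--     last_two = name[-2:]
--     middle_length = len(name) - 4
--
--     return f"{first_two}{'*' * middle_length}{last_two}"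
--
-- def anonymize_data(data: dict, name_fields: list[str] = None) -> dict:
--     """Anonymize specified name fields in the data dictionary."""
--     fields = set(["seller_name", "buyer_name"] if name_fields is None else name_fields)
--     return {k: anonymize_name(v) if k in fields and isinstance(v, str) else v
--             for k, v in data.items()}
-- ===== Notes on version B (the rewrite author's own statement) =====
-- stated objective: idiomatic
-- what changed: B flips the traversal axis: instead of A's loop over the name_fields list mutating a dict copy via repeated lookups and updates, B builds a set of the field names once and constructs the result in a single dict comprehension over data.items(); the Lean Pre_ additionally restricts the association list to unique keys, i.e. to lists that actually represent a Python dict.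
import Mathlib
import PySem

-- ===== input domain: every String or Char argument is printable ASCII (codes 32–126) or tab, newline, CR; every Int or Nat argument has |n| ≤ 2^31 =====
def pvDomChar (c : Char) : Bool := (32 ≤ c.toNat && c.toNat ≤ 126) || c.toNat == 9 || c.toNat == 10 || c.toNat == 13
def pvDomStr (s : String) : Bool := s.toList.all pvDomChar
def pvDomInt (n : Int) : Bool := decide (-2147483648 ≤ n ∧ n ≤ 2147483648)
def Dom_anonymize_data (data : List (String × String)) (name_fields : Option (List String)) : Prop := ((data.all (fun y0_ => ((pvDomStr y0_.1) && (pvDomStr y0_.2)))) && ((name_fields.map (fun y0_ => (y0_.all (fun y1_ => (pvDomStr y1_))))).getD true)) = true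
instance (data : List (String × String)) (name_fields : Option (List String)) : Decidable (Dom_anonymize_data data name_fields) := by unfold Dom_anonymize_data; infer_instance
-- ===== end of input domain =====

-- B builds a set of the target field names and maps once over the data's entries, instead of
-- A's loop over the field list with repeated dict lookups/updates; same return value.

-- ===== PORT A =====
-- shared helper: Python's anonymize_name (identical in A and B)
def anonymize_name (name : String) : String :=
  if name = "" ∨ PySem.Str.len name ≤ 4 then name
  else
    String.ofList (PySem.List.slice name.toList none (some 2)
      ++ List.replicate (PySem.Str.len name - 4).toNat '*'
      ++ PySem.List.slice name.toList (some (-2)) none)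

-- one iteration of A's 'for field in name_fields' loop (isinstance(…, str) is always true here)
def anonStep (d : PySem.Dict String String) (field : String) : PySem.Dict String String :=
  match d.get? field with
  | some v => d.insert field (anonymize_name v)
  | none => d

def anonymize_data (data : List (String × String)) (name_fields : Option (List String)) : List (String × String) :=
  let fields := name_fields.getD ["seller_name", "buyer_name"]
  (fields.foldl anonStep (PySem.Dict.mk data)).items

-- ===== PORT B =====
def anonymize_data_alt (data : List (String × String)) (name_fields : Option (List String)) : List (String × String) :=
  let fields : PySem.Set String := PySem.Set.ofList (name_fields.getD ["seller_name", "buyer_name"])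
  data.map (fun p => if PySem.Set.contains fields p.1 then (p.1, anonymize_name p.2) else p)

-- ===== PRECONDITION & SPEC =====
-- Pre_ excludes association lists with duplicate keys: they do not represent any Python dict
-- (a Python dict literal collapses duplicate keys), so behaviour on them is accidental.
def Pre_anonymize_data (data : List (String × String)) (name_fields : Option (List String)) : Prop :=
  (data.map Prod.fst).Nodup

instance (data : List (String × String)) (name_fields : Option (List String)) : Decidable (Pre_anonymize_data data name_fields) := by unfold Pre_anonymize_data; infer_instance

def pvWitness_anonymize_data : (List (String × String)) × Option (List String) :=
  ([("seller_name", "Jan Kowalski"), ("note", "ok")], none)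

def Spec_anonymize_data (data : List (String × String)) (name_fields : Option (List String)) (out : List (String × String)) : Prop := out = anonymize_data_alt data name_fields
instance (data : List (String × String)) (name_fields : Option (List String)) (out : List (String × String)) : Decidable (Spec_anonymize_data data name_fields out) := by unfold Spec_anonymize_data; infer_instance

-- ===== CLAIM (what is proved, stated in full; the proofs are below) =====
def Claim_equal_anonymize_data : Prop := ∀ (data : List (String × String)) (name_fields : Option (List String)), Dom_anonymize_data data name_fields → Pre_anonymize_data data name_fields → Spec_anonymize_data data name_fields (anonymize_data data name_fields)

-- ===== LEMMAS AND PROOFS =====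

-- anonymize_name keeps the first two and last two characters and the length, hence is
-- idempotent (anonymize_name_idem), which covers repeated field names in A's loop.
set_option maxHeartbeats 1000000 in
lemma anonymize_name_of_long (t : String) (h5 : 5 ≤ t.toList.length) :
    anonymize_name t = String.ofList (t.toList.take 2
      ++ List.replicate (t.toList.length - 4) '*'
      ++ t.toList.drop (t.toList.length - 2)) := by
  have hne : ¬ (t = "" ∨ PySem.Str.len t ≤ 4) := by
    refine not_or.mpr ⟨?_, ?_⟩
    · intro h; subst h; simp at h5
    · intro hc; rw [PySem.Str.len_eq] at hc; omega
  rw [anonymize_name]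
  rw [if_neg hne]
  rw [PySem.List.slice_to _ (by norm_num)]
  have hmid : (PySem.Str.len t - 4).toNat = t.toList.length - 4 := by
    rw [PySem.Str.len_eq]; omega
  rw [PySem.List.slice_some_none, PySem.List.clampIdx_neg_ofNat _ 2 (by norm_num), hmid,
      show Int.toNat 2 = 2 from rfl]

set_option maxHeartbeats 1000000 in
lemma anonymize_name_idem (s : String) : anonymize_name (anonymize_name s) = anonymize_name s := by
  by_cases h : s = "" ∨ PySem.Str.len s ≤ 4
  · simp only [anonymize_name, if_pos h]
  · have hlen : 5 ≤ s.toList.length := by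
      rcases not_or.mp h with ⟨h1, h2⟩
      rw [PySem.Str.len_eq] at h2; omega
    set l := s.toList.take 2 ++ List.replicate (s.toList.length - 4) '*'
        ++ s.toList.drop (s.toList.length - 2) with hl
    have hllen : l.length = s.toList.length := by
      rw [hl]
      simp only [List.length_append, List.length_take, List.length_replicate, List.length_drop]
      omega
    have hinner : anonymize_name s = String.ofList l := anonymize_name_of_long s hlen
    rw [hinner, anonymize_name_of_long (String.ofList l)
          (by rw [String.toList_ofList]; omega)]
    congr 1
    rw [String.toList_ofList, hllen]
    have htake : l.take 2 = s.toList.take 2 := by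
      rw [hl, List.append_assoc,
          List.take_left' (by rw [List.length_take]; omega)]
    have hdrop : l.drop (s.toList.length - 2) = s.toList.drop (s.toList.length - 2) := by
      rw [hl, List.drop_left'
            (by rw [List.length_append, List.length_take, List.length_replicate]; omega)]
    rw [htake, hdrop]

-- A's loop over the field list, on a dict with Nodup keys, is B's single map over the items.
lemma items_foldl_anonStep (fs : List String) (d : PySem.Dict String String)
    (hnd : d.keys.Nodup) :
    (fs.foldl anonStep d).items
      = d.items.map (fun p => if p.1 ∈ fs then (p.1, anonymize_name p.2) else p) := by
  induction fs generalizing d with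
  | nil => simp
  | cons f fs ih =>
    rw [List.foldl_cons]
    cases hge : d.get? f with
    | none =>
      have hstep : anonStep d f = d := by simp [anonStep, hge]
      rw [hstep, ih d hnd]
      apply List.map_congr_left
      intro p hp
      have hkeys : p.1 ∈ d.keys := by
        simp [PySem.Dict.keys]; exact ⟨p.2, hp⟩
      have hf : f ∉ d.keys := (PySem.Dict.get?_eq_none_iff_not_mem_keys d f).mp hge
      have hpf : p.1 ≠ f := fun h => hf (h ▸ hkeys)
      simp [hpf]
    | some v =>
      have hc : d.contains f = true := by
        rw [PySem.Dict.contains_eq_isSome_get?, hge]; rfl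
      have hstep : anonStep d f = d.insert f (anonymize_name v) := by simp [anonStep, hge]
      rw [hstep, ih _ (PySem.Dict.nodup_keys_insert _ _ _ hnd),
          PySem.Dict.items_insert_of_contains _ _ hc, List.map_map]
      apply List.map_congr_left
      intro p hp
      by_cases hpf : p.1 = f
      · have hv : p.2 = v := by
          have hmem : (f, p.2) ∈ d.items := by rw [← hpf]; exact hp
          have := PySem.Dict.get?_of_mem_items _ hmem hnd
          rw [hge] at this; exact (Option.some_injective _ this).symm
        simp only [Function.comp]
        simp [hpf, hv, anonymize_name_idem]
      · simp [Function.comp, hpf]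

-- ===== VERDICT (by name: the statement is the Claim_ definition above) =====
theorem anonymize_data_spec : Claim_equal_anonymize_data := by
  intro data name_fields _ hpre
  unfold Spec_anonymize_data anonymize_data anonymize_data_alt
  have hnd : (PySem.Dict.mk data).keys.Nodup := hpre
  rw [items_foldl_anonStep _ _ hnd]
  apply List.map_congr_left
  intro p _
  by_cases h : p.1 ∈ name_fields.getD ["seller_name", "buyer_name"] <;>
    simp [PySem.Set.mem_ofList, h]
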